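-- pv_equiv track=rewrite | github.com/zizhao-hu/FusionSpaceModalityGap | utils/analyze_image_metrics_large.py | interpolate_checkpoint
-- ===== SOURCE A (Python) =====
-- def interpolate_checkpoint(available_checkpoints, target_gen, group="recursive"):
--     """Interpolate or extrapolate to find the best checkpoint for a target generation"""
--     if group not in available_checkpoints:
--         return None
--
--     checkpoints = available_checkpoints[group]
--     if target_gen in checkpoints:
--         return checkpoints[target_gen]
--
--     # Get available generations
--     available_gens = sorted(list(checkpoints.keys()))
--     if not available_gens:
--         return None
--
--     # Find closest generations for interpolation
--     lower_gen = None
--     upper_gen = None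
--
--     for gen in available_gens:
--         if gen < target_gen:
--             if lower_gen is None or gen > lower_gen:
--                 lower_gen = gen
--         elif gen > target_gen:
--             if upper_gen is None or gen < upper_gen:
--                 upper_gen = gen
--
--     # Extrapolate if needed
--     if lower_gen is None:
--         return checkpoints[min(available_gens)]
--     if upper_gen is None:
--         return checkpoints[max(available_gens)]
--
--     # Return the closest checkpoint
--     if (target_gen - lower_gen) <= (upper_gen - target_gen):
--         return checkpoints[lower_gen]
--     else:
--         return checkpoints[upper_gen]
-- ===== SOURCE B (Python) =====
-- def interpolate_checkpoint(available_checkpoints, target_gen, group="recursive"):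
--     """Single min() pass: pick the generation minimizing (|gen - target|, gen); no sort."""
--     cps = available_checkpoints.get(group)
--     if not cps:
--         return None
--     best = min(cps, key=lambda g: (abs(g - target_gen), g))
--     return cps[best]
-- ===== Notes on version B (the rewrite author's own statement) =====
-- stated objective: simpler
-- what changed: Replaces the sort + explicit lower/upper tracking loop + four return branches by a single min() over the keys with the lexicographic key (|gen-target|, gen), which subsumes exact match, interpolation tie-breaking toward the lower generation, and both extrapolation cases.
import Mathlib
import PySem

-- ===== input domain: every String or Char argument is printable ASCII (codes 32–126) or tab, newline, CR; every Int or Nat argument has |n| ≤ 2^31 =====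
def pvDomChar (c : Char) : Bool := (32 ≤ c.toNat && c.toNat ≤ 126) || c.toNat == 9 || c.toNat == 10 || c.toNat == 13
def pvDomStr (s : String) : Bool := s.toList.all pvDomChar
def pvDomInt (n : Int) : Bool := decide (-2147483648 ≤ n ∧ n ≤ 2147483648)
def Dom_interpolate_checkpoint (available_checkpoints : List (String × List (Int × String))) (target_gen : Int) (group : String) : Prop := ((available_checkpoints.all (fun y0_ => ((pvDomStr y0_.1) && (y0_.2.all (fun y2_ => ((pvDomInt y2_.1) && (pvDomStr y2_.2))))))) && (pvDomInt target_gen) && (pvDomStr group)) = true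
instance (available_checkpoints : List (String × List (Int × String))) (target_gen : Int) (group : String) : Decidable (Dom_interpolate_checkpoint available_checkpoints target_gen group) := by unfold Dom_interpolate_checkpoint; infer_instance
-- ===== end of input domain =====

-- B replaces A's sort + lower/upper tracking loop + four return branches by one min() with key (|gen-target|, gen); objective: simpler.

-- ===== PORT A =====
-- the body of A's `for gen in available_gens` loop, updating (lower_gen, upper_gen)
def pvStepA (t : Int) (p : Option Int × Option Int) (g : Int) : Option Int × Option Int :=
  if g < t then
    (match p.1 with | none => some g | some l => if g > l then some g else some l, p.2)
  else if g > t then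
    (p.1, match p.2 with | none => some g | some u => if g < u then some g else some u)
  else p

def interpolate_checkpoint (available_checkpoints : List (String × List (Int × String))) (target_gen : Int) (group : String) : Option String :=
  match (PySem.Dict.mk available_checkpoints).get? group with
  | none => none                                   -- `if group not in available_checkpoints: return None`
  | some checkpoints =>
    match (PySem.Dict.mk checkpoints).get? target_gen with
    | some v => some v                             -- `if target_gen in checkpoints: return checkpoints[target_gen]`
    | none =>
      let available_gens := PySem.List.sorted (checkpoints.map (fun p => p.1)) (fun x => x) false
      if available_gens = [] then none             -- `if not available_gens: return None`
      else
        let lu := available_gens.foldl (pvStepA target_gen) (none, none)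
        match lu.1, lu.2 with
        | none, _ =>                               -- `if lower_gen is None: return checkpoints[min(available_gens)]`
          (PySem.List.min? available_gens (fun x => x)).bind (fun m => (PySem.Dict.mk checkpoints).get? m)
        | some _, none =>                          -- `if upper_gen is None: return checkpoints[max(available_gens)]`
          (PySem.List.max? available_gens (fun x => x)).bind (fun m => (PySem.Dict.mk checkpoints).get? m)
        | some lower_gen, some upper_gen =>
          if target_gen - lower_gen ≤ upper_gen - target_gen then (PySem.Dict.mk checkpoints).get? lower_gen
          else (PySem.Dict.mk checkpoints).get? upper_gen

-- ===== PORT B =====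
def interpolate_checkpoint_alt (available_checkpoints : List (String × List (Int × String))) (target_gen : Int) (group : String) : Option String :=
  match (PySem.Dict.mk available_checkpoints).get? group with
  | none => none                                   -- `cps = available_checkpoints.get(group)` gave None; `if not cps`
  | some cps =>
    if cps = [] then none                          -- `if not cps: return None`
    else
      (PySem.List.min2? (cps.map (fun p => p.1)) (fun g => |g - target_gen|) (fun g => g)).bind
        (fun best => (PySem.Dict.mk cps).get? best)   -- `best = min(cps, key=lambda g: (abs(g-target_gen), g)); return cps[best]`

-- ===== PRECONDITION & SPEC =====
def Spec_interpolate_checkpoint (available_checkpoints : List (String × List (Int × String))) (target_gen : Int) (group : String) (out : Option String) : Prop := out = interpolate_checkpoint_alt available_checkpoints target_gen group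
instance (available_checkpoints : List (String × List (Int × String))) (target_gen : Int) (group : String) (out : Option String) : Decidable (Spec_interpolate_checkpoint available_checkpoints target_gen group out) := by unfold Spec_interpolate_checkpoint; infer_instance

-- ===== CLAIM (what is proved, stated in full; the proofs are below) =====
def Claim_equal_interpolate_checkpoint : Prop := ∀ (available_checkpoints : List (String × List (Int × String))) (target_gen : Int) (group : String), Dom_interpolate_checkpoint available_checkpoints target_gen group → Spec_interpolate_checkpoint available_checkpoints target_gen group (interpolate_checkpoint available_checkpoints target_gen group)

-- ===== LEMMAS AND PROOFS =====

-- lexicographic order on the key (|a - t|, a) used by B's min()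
def pvLexLE (t a b : Int) : Prop := |a - t| < |b - t| ∨ (|a - t| = |b - t| ∧ a ≤ b)

def pvLexMin (t : Int) (K : List Int) (c : Int) : Prop := c ∈ K ∧ ∀ y ∈ K, pvLexLE t c y

lemma pvLexMin_unique {t c c' : Int} {K : List Int} (h : pvLexMin t K c) (h' : pvLexMin t K c') : c = c' := by
  rcases h.2 c' h'.1 with h1 | ⟨e1, le1⟩ <;> rcases h'.2 c h.1 with h2 | ⟨e2, le2⟩
  · linarith
  · linarith
  · linarith
  · exact le_antisymm le1 le2

-- invariant of B's min() fold: the accumulator is a lex-minimum of the processed prefix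
def pvAccInv (t : Int) (M : List Int) (acc : Option Int) : Prop :=
  match acc with
  | none => M = []
  | some m => pvLexMin t M m

def pvStepB (t : Int) (acc : Option Int) (x : Int) : Option Int :=
  match acc with
  | none => some x
  | some m => if (decide (|x - t| < |m - t|) || !decide (|m - t| < |x - t|) && decide (x < m)) = true
              then some x else some m

lemma pvMin2Inv (t : Int) : ∀ (L M : List Int) (acc : Option Int), pvAccInv t M acc →
    pvAccInv t (M ++ L) (L.foldl (pvStepB t) acc) := by
  intro L
  induction L with
  | nil => intro M acc h; simpa using h
  | cons g L ih =>
    intro M acc h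
    rw [List.foldl_cons, show M ++ g :: L = (M ++ [g]) ++ L by simp]
    apply ih
    cases acc with
    | none =>
      simp only [pvAccInv] at h; subst h
      show pvLexMin t ([] ++ [g]) g
      refine ⟨by simp, ?_⟩
      intro y hy
      have hyg : y = g := by simpa using hy
      subst hyg
      exact Or.inr ⟨rfl, le_refl _⟩
    | some m =>
      simp only [pvAccInv, pvLexMin] at h
      obtain ⟨hm, hlex⟩ := h
      show pvAccInv t (M ++ [g])
        (if (decide (|g - t| < |m - t|) || !decide (|m - t| < |g - t|) && decide (g < m)) = true
         then some g else some m)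
      by_cases hc : (decide (|g - t| < |m - t|) || !decide (|m - t| < |g - t|) && decide (g < m)) = true
      · rw [if_pos hc]
        simp only [Bool.or_eq_true, Bool.and_eq_true, Bool.not_eq_true', decide_eq_true_eq,
          decide_eq_false_iff_not] at hc
        refine ⟨List.mem_append_right _ (List.mem_singleton.mpr rfl), ?_⟩
        intro y hy
        rcases List.mem_append.mp hy with hyM | hyg
        · have := hlex y hyM
          unfold pvLexLE at this ⊢
          omega
        · have : y = g := List.mem_singleton.mp hyg
          subst this
          exact Or.inr ⟨rfl, le_refl _⟩
      · rw [if_neg hc]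
        simp only [Bool.or_eq_true, Bool.and_eq_true, Bool.not_eq_true', decide_eq_true_eq,
          decide_eq_false_iff_not, not_or, not_and] at hc
        refine ⟨List.mem_append_left _ hm, ?_⟩
        intro y hy
        rcases List.mem_append.mp hy with hyM | hyg
        · exact hlex y hyM
        · have : y = g := List.mem_singleton.mp hyg
          subst this
          unfold pvLexLE
          omega

lemma pvMin2_char (t : Int) (K : List Int) (h : K ≠ []) :
    ∃ b, PySem.List.min2? K (fun g => |g - t|) (fun g => g) = some b ∧ pvLexMin t K b := by
  have heq : PySem.List.min2? K (fun g => |g - t|) (fun g => g) = K.foldl (pvStepB t) none := by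
    unfold PySem.List.min2?
    apply PySem.List.foldl_congr_mem
    intro acc x _
    cases acc with
    | none => rfl
    | some m => exact if_congr (by simp) rfl rfl
  have hinv := pvMin2Inv t K [] none (by simp [pvAccInv])
  rw [List.nil_append] at hinv
  rw [heq]
  cases hr : K.foldl (pvStepB t) none with
  | none => rw [hr] at hinv; exact absurd hinv h
  | some b =>
    rw [hr] at hinv
    exact ⟨b, rfl, hinv⟩

-- invariants of A's loop: lower_gen is the max of the keys below t, upper_gen the min above
def pvBelow (t : Int) (M : List Int) (o : Option Int) : Prop :=
  match o with
  | none => ∀ g ∈ M, ¬ g < t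
  | some l => l ∈ M ∧ l < t ∧ ∀ g ∈ M, g < t → g ≤ l

def pvAbove (t : Int) (M : List Int) (o : Option Int) : Prop :=
  match o with
  | none => ∀ g ∈ M, ¬ t < g
  | some u => u ∈ M ∧ t < u ∧ ∀ g ∈ M, t < g → u ≤ g

lemma pvStepA_inv (t : Int) : ∀ (L M : List Int) (p : Option Int × Option Int),
    pvBelow t M p.1 → pvAbove t M p.2 →
    pvBelow t (M ++ L) ((L.foldl (pvStepA t) p).1) ∧ pvAbove t (M ++ L) ((L.foldl (pvStepA t) p).2) := by
  intro L
  induction L with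
  | nil => intro M p h1 h2; simpa using ⟨h1, h2⟩
  | cons g L ih =>
    intro M p h1 h2
    rw [List.foldl_cons, show M ++ g :: L = (M ++ [g]) ++ L by simp]
    apply ih
    · -- pvBelow after one step
      unfold pvStepA
      split_ifs with hg hg'
      · cases hp : p.1 with
        | none =>
          rw [hp] at h1; simp only [pvBelow]
          refine ⟨List.mem_append_right _ (List.mem_singleton.mpr rfl), hg, ?_⟩
          intro y hy hyt
          rcases List.mem_append.mp hy with hM | hG
          · exact absurd hyt (h1 y hM)
          · have := List.mem_singleton.mp hG; omega
        | some l =>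
          rw [hp] at h1; obtain ⟨hlM, hlt, hmax⟩ := h1
          simp only [pvBelow]
          split_ifs with hgl
          · refine ⟨List.mem_append_right _ (List.mem_singleton.mpr rfl), hg, ?_⟩
            intro y hy hyt
            rcases List.mem_append.mp hy with hM | hG
            · have := hmax y hM hyt; omega
            · have := List.mem_singleton.mp hG; omega
          · refine ⟨List.mem_append_left _ hlM, hlt, ?_⟩
            intro y hy hyt
            rcases List.mem_append.mp hy with hM | hG
            · exact hmax y hM hyt
            · have := List.mem_singleton.mp hG; omega
      · cases hp : p.1 with
        | none =>
          rw [hp] at h1; simp only [pvBelow]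
          intro y hy
          rcases List.mem_append.mp hy with hM | hG
          · exact h1 y hM
          · have := List.mem_singleton.mp hG; omega
        | some l =>
          rw [hp] at h1; obtain ⟨hlM, hlt, hmax⟩ := h1
          simp only [pvBelow]
          refine ⟨List.mem_append_left _ hlM, hlt, ?_⟩
          intro y hy hyt
          rcases List.mem_append.mp hy with hM | hG
          · exact hmax y hM hyt
          · have := List.mem_singleton.mp hG; omega
      · cases hp : p.1 with
        | none =>
          rw [hp] at h1; simp only [pvBelow]
          intro y hy
          rcases List.mem_append.mp hy with hM | hG
          · exact h1 y hM
          · have := List.mem_singleton.mp hG; omega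
        | some l =>
          rw [hp] at h1; obtain ⟨hlM, hlt, hmax⟩ := h1
          simp only [pvBelow]
          refine ⟨List.mem_append_left _ hlM, hlt, ?_⟩
          intro y hy hyt
          rcases List.mem_append.mp hy with hM | hG
          · exact hmax y hM hyt
          · have := List.mem_singleton.mp hG; omega
    · -- pvAbove after one step
      unfold pvStepA
      split_ifs with hg hg'
      · cases hp : p.2 with
        | none =>
          rw [hp] at h2; simp only [pvAbove]
          intro y hy
          rcases List.mem_append.mp hy with hM | hG
          · exact h2 y hM
          · have := List.mem_singleton.mp hG; omega
        | some u =>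
          rw [hp] at h2; obtain ⟨huM, hut, hmin⟩ := h2
          simp only [pvAbove]
          refine ⟨List.mem_append_left _ huM, hut, ?_⟩
          intro y hy hyt
          rcases List.mem_append.mp hy with hM | hG
          · exact hmin y hM hyt
          · have := List.mem_singleton.mp hG; omega
      · cases hp : p.2 with
        | none =>
          rw [hp] at h2; simp only [pvAbove]
          refine ⟨List.mem_append_right _ (List.mem_singleton.mpr rfl), hg', ?_⟩
          intro y hy hyt
          rcases List.mem_append.mp hy with hM | hG
          · exact absurd hyt (h2 y hM)
          · have := List.mem_singleton.mp hG; omega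
        | some u =>
          rw [hp] at h2; obtain ⟨huM, hut, hmin⟩ := h2
          simp only [pvAbove]
          split_ifs with hgu
          · refine ⟨List.mem_append_right _ (List.mem_singleton.mpr rfl), hg', ?_⟩
            intro y hy hyt
            rcases List.mem_append.mp hy with hM | hG
            · have := hmin y hM hyt; omega
            · have := List.mem_singleton.mp hG; omega
          · refine ⟨List.mem_append_left _ huM, hut, ?_⟩
            intro y hy hyt
            rcases List.mem_append.mp hy with hM | hG
            · exact hmin y hM hyt
            · have := List.mem_singleton.mp hG; omega
      · cases hp : p.2 with
        | none =>
          rw [hp] at h2; simp only [pvAbove]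
          intro y hy
          rcases List.mem_append.mp hy with hM | hG
          · exact h2 y hM
          · have := List.mem_singleton.mp hG; omega
        | some u =>
          rw [hp] at h2; obtain ⟨huM, hut, hmin⟩ := h2
          simp only [pvAbove]
          refine ⟨List.mem_append_left _ huM, hut, ?_⟩
          intro y hy hyt
          rcases List.mem_append.mp hy with hM | hG
          · exact hmin y hM hyt
          · have := List.mem_singleton.mp hG; omega

lemma pvAbs_lt {a t : Int} (h : a < t) : |a - t| = t - a := by rw [abs_of_neg (by omega)]; ring
lemma pvAbs_ge {a t : Int} (h : t ≤ a) : |a - t| = a - t := abs_of_nonneg (by omega)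

lemma pvLexMin_self {t : Int} {K : List Int} (h : t ∈ K) : pvLexMin t K t := by
  refine ⟨h, fun y hy => ?_⟩
  unfold pvLexLE
  rcases eq_or_ne y t with rfl | hne
  · exact Or.inr ⟨rfl, le_refl _⟩
  · left
    rw [sub_self, abs_zero]
    exact abs_pos.mpr (sub_ne_zero.mpr hne)

-- the heart of the equivalence: A's inner body on the group's checkpoint list equals B's
lemma pvBody_eq (cps : List (Int × String)) (t : Int) :
    (match (PySem.Dict.mk cps).get? t with
     | some v => some v
     | none =>
       let available_gens := PySem.List.sorted (cps.map (fun p => p.1)) (fun x => x) false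
       if available_gens = [] then none
       else
         let lu := available_gens.foldl (pvStepA t) (none, none)
         match lu.1, lu.2 with
         | none, _ =>
           (PySem.List.min? available_gens (fun x => x)).bind (fun m => (PySem.Dict.mk cps).get? m)
         | some _, none =>
           (PySem.List.max? available_gens (fun x => x)).bind (fun m => (PySem.Dict.mk cps).get? m)
         | some lower_gen, some upper_gen =>
           if t - lower_gen ≤ upper_gen - t then (PySem.Dict.mk cps).get? lower_gen
           else (PySem.Dict.mk cps).get? upper_gen)
    = (if cps = [] then none
       else (PySem.List.min2? (cps.map (fun p => p.1)) (fun g => |g - t|) (fun g => g)).bind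
         (fun best => (PySem.Dict.mk cps).get? best)) := by
  cases hv : (PySem.Dict.mk cps).get? t with
  | some v =>
    -- exact hit: B's lex-minimum is t itself
    simp only
    obtain ⟨p, hfind, hp2⟩ : ∃ p, cps.find? (fun p => p.1 == t) = some p ∧ p.2 = v := by
      simpa [PySem.Dict.get?, Option.map_eq_some_iff] using hv
    have hpmem : p ∈ cps := List.mem_of_find?_eq_some hfind
    have hp1 : p.1 = t := by simpa using List.find?_some hfind
    have htK : t ∈ cps.map (fun p => p.1) := List.mem_map.mpr ⟨p, hpmem, hp1⟩
    have hcps : cps ≠ [] := List.ne_nil_of_mem hpmem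
    obtain ⟨b, hb, hbm⟩ := pvMin2_char t (cps.map (fun p => p.1)) (by simpa using hcps)
    have hbt : b = t := pvLexMin_unique hbm (pvLexMin_self htK)
    rw [if_neg hcps, hb]
    simp only [Option.bind_some]
    rw [hbt, hv]
  | none =>
    have htK : t ∉ cps.map (fun p => p.1) := by
      intro hmem
      obtain ⟨p, hpmem, hp1⟩ := List.mem_map.mp hmem
      have hfind : cps.find? (fun p => p.1 == t) = none := by
        simpa [PySem.Dict.get?, Option.map_eq_none_iff] using hv
      have := List.find?_eq_none.mp hfind p hpmem
      simp [hp1] at this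
    by_cases hcps : cps = []
    · subst hcps; rfl
    · have hK : cps.map (fun p => p.1) ≠ [] := by simpa using hcps
      have hmem : ∀ y, y ∈ PySem.List.sorted (cps.map (fun p => p.1)) (fun x => x) false
          ↔ y ∈ cps.map (fun p => p.1) := fun y => PySem.List.mem_sorted _ _ _ _
      have hgnil : PySem.List.sorted (cps.map (fun p => p.1)) (fun x => x) false ≠ [] := by
        rw [Ne, PySem.List.sorted_eq_nil_iff]; exact hK
      obtain ⟨b, hb, hbm⟩ := pvMin2_char t (cps.map (fun p => p.1)) hK
      simp only [if_neg hgnil, if_neg hcps, hb, Option.bind_some]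
      obtain ⟨hBlo, hAup⟩ := pvStepA_inv t
        (PySem.List.sorted (cps.map (fun p => p.1)) (fun x => x) false) [] (none, none)
        (by intro g hg; simp at hg) (by intro g hg; simp at hg)
      rw [List.nil_append] at hBlo hAup
      rcases hfold : (PySem.List.sorted (cps.map (fun p => p.1)) (fun x => x) false).foldl
          (pvStepA t) (none, none) with ⟨lo, up⟩
      rw [hfold] at hBlo hAup
      simp only at hBlo hAup
      rw [hfold]
      cases lo with
      | none =>
        simp only [pvBelow] at hBlo
        cases hmin : PySem.List.min? (PySem.List.sorted (cps.map (fun p => p.1)) (fun x => x) false)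
            (fun x => x) with
        | none => exact absurd ((PySem.List.min?_eq_none_iff _ _).mp hmin) hgnil
        | some m =>
          have hmG := PySem.List.min?_mem hmin
          have hmle : ∀ y ∈ PySem.List.sorted (cps.map (fun p => p.1)) (fun x => x) false, m ≤ y :=
            PySem.List.min?_isMin hmin
          have hml : pvLexMin t (cps.map (fun p => p.1)) m := by
            refine ⟨(hmem m).mp hmG, fun y hy => ?_⟩
            have hyG := (hmem y).mpr hy
            have h1 : ¬ y < t := hBlo y hyG
            have h2 : ¬ m < t := hBlo m hmG
            have h3 : y ≠ t := fun e => htK (e ▸ hy)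
            have h4 : m ≠ t := fun e => htK (e ▸ (hmem m).mp hmG)
            have h5 := hmle y hyG
            unfold pvLexLE
            rw [pvAbs_ge (by omega), pvAbs_ge (by omega)]
            omega
          have hbm' : b = m := pvLexMin_unique hbm hml
          simp only [Option.bind_some, hbm']
      | some l =>
        simp only [pvBelow] at hBlo
        obtain ⟨hlG, hlt, hlmax⟩ := hBlo
        cases up with
        | none =>
          simp only [pvAbove] at hAup
          cases hmax : PySem.List.max? (PySem.List.sorted (cps.map (fun p => p.1)) (fun x => x) false)
              (fun x => x) with
          | none => exact absurd ((PySem.List.max?_eq_none_iff _ _).mp hmax) hgnil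
          | some m =>
            have hmG := PySem.List.max?_mem hmax
            have hmge : ∀ y ∈ PySem.List.sorted (cps.map (fun p => p.1)) (fun x => x) false, y ≤ m :=
              PySem.List.max?_isMax hmax
            have hml : pvLexMin t (cps.map (fun p => p.1)) m := by
              refine ⟨(hmem m).mp hmG, fun y hy => ?_⟩
              have hyG := (hmem y).mpr hy
              have h1 : ¬ t < y := hAup y hyG
              have h2 : ¬ t < m := hAup m hmG
              have h3 : y ≠ t := fun e => htK (e ▸ hy)
              have h4 : m ≠ t := fun e => htK (e ▸ (hmem m).mp hmG)
              have h5 := hmge y hyG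
              unfold pvLexLE
              rw [pvAbs_lt (by omega), pvAbs_lt (by omega)]
              omega
            have hbm' : b = m := pvLexMin_unique hbm hml
            simp only [Option.bind_some, hbm']
        | some u =>
          simp only [pvAbove] at hAup
          obtain ⟨huG, hut, humin⟩ := hAup
          show (if t - l ≤ u - t then (PySem.Dict.mk cps).get? l else (PySem.Dict.mk cps).get? u)
            = (PySem.Dict.mk cps).get? b
          split_ifs with hd
          · have hml : pvLexMin t (cps.map (fun p => p.1)) l := by
              refine ⟨(hmem l).mp hlG, fun y hy => ?_⟩
              have hyG := (hmem y).mpr hy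
              have h3 : y ≠ t := fun e => htK (e ▸ hy)
              unfold pvLexLE
              rcases lt_or_gt_of_ne h3 with hyt | hyt
              · have := hlmax y hyG hyt
                rw [pvAbs_lt hlt, pvAbs_lt hyt]
                omega
              · have := humin y hyG hyt
                rw [pvAbs_lt hlt, pvAbs_ge (by omega)]
                omega
            rw [pvLexMin_unique hbm hml]
          · have hml : pvLexMin t (cps.map (fun p => p.1)) u := by
              refine ⟨(hmem u).mp huG, fun y hy => ?_⟩
              have hyG := (hmem y).mpr hy
              have h3 : y ≠ t := fun e => htK (e ▸ hy)
              unfold pvLexLE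
              rcases lt_or_gt_of_ne h3 with hyt | hyt
              · have := hlmax y hyG hyt
                rw [pvAbs_ge (by omega), pvAbs_lt hyt]
                omega
              · have := humin y hyG hyt
                rw [pvAbs_ge (by omega), pvAbs_ge (by omega)]
                omega
            rw [pvLexMin_unique hbm hml]

-- ===== VERDICT (by name: the statement is the Claim_ definition above) =====
theorem interpolate_checkpoint_spec : Claim_equal_interpolate_checkpoint := by
  intro avail t group _
  unfold Spec_interpolate_checkpoint interpolate_checkpoint interpolate_checkpoint_alt
  cases hgr : (PySem.Dict.mk avail).get? group with
  | none => rfl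
  | some cps => exact pvBody_eq cps t
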